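-- pv_equiv track=rewrite | github.com/Tobiscuit/wizwalker-rs | deimos-reference/src/drop_logger.py | find_new_stuff
-- ===== SOURCE A (Python) =====
-- def find_new_stuff(old: str, new: str) -> str:
--     # CREDIT TO SIROLAF FOR THIS FUNCTION
-- 	found_idx = -1
--
-- 	while True:
-- 		found_idx = new.find(old)
-- 		if found_idx >= 0:
-- 			break
-- 		old = old[1:]
-- 		if len(old) == 0:
-- 			break
--
-- 	if found_idx < 0:
-- 		return new # entire string is new
-- 	return new[found_idx+len(old):]
-- ===== SOURCE B (Python) =====
-- def find_new_stuff(old: str, new: str) -> str: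
--     # Binary search for the shortest drop k such that old[k:] occurs in new.
--     # Valid because "old[k:] occurs in new" is monotone in k (a suffix of an
--     # occurring string also occurs).
--     n = len(old)
--     if n == 0 or old[n - 1:] not in new:
--         return new
--     lo, hi = 0, n - 1  # invariant: old[hi:] in new; old[k:] not in new for all k < lo
--     while lo < hi:
--         mid = (lo + hi) // 2
--         if old[mid:] in new:
--             hi = mid
--         else:
--             lo = mid + 1
--     return new[new.find(old[lo:]) + (n - lo):]
-- ===== Notes on version B (the rewrite author's own statement) =====
-- stated objective: faster
-- what changed: A linearly shortens old one character at a time, calling new.find on every suffix; B exploits that 'old[k:] occurs in new' is monotone in k and binary-searches for the shortest drop, doing O(log len_old) substring searches instead of O(len_old).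
import Mathlib
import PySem

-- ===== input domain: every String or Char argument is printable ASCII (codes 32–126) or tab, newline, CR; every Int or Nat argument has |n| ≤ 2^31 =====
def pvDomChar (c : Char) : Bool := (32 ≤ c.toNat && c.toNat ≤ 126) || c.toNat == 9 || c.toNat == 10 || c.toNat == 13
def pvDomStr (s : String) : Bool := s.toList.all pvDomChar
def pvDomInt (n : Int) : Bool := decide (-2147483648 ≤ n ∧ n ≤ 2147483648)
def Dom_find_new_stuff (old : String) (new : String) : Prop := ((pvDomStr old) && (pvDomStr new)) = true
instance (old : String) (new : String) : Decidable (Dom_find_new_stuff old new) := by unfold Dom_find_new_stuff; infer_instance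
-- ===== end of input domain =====

-- B replaces A's linear scan over ever-shorter suffixes of `old` by a binary search
-- (occurrence of old[k:] in new is monotone in k), objective: faster.

-- ===== PORT A =====
-- the `while True` loop of A: state is (old, found_idx); returns (found_idx, old) at break
def findLoopA (old newL : List Char) : Int × List Char :=
  let f := PySem.Chars.find newL old          -- found_idx = new.find(old)
  if 0 ≤ f then (f, old)                      -- if found_idx >= 0: break
  else
    let old' := PySem.List.slice old (some 1) none   -- old = old[1:]
    if old'.length = 0 then (f, old')                -- if len(old) == 0: break
    else findLoopA old' newL
termination_by old.length
decreasing_by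
  rename_i hlen
  cases old with
  | nil => exact absurd (show (PySem.List.slice ([] : List Char) (some 1) none).length = 0 from rfl) hlen
  | cons c t => rw [PySem.List.slice_from_one]; simp

def find_new_stuff (old : String) (new : String) : String :=
  let r := findLoopA old.toList new.toList
  if r.1 < 0 then new                                        -- entire string is new
  else String.ofList (PySem.List.slice new.toList (some (r.1 + r.2.length)) none)  -- new[found_idx+len(old):]

-- ===== PORT B =====
-- binary search: smallest lo in [lo, hi] with old[lo:] in new (given old[hi:] in new)
def bsearchB (oldL newL : List Char) (lo hi : Int) : Int :=
  if h : lo < hi then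
    let mid := PySem.Int.floordiv (lo + hi) 2
    if PySem.Chars.isIn (PySem.List.slice oldL (some mid) none) newL then
      bsearchB oldL newL lo mid
    else
      bsearchB oldL newL (mid + 1) hi
  else lo
termination_by (hi - lo).toNat
decreasing_by
  · have : PySem.Int.floordiv (lo + hi) 2 < hi := by
      rw [PySem.Int.floordiv_lt_iff_lt_mul (by norm_num)]; omega
    omega
  · have hb := PySem.Int.floordiv_two_mid_bounds (le_of_lt h)
    omega

def find_new_stuff_alt (old : String) (new : String) : String :=
  let n := old.toList.length
  if n = 0 ∨ ¬ PySem.Chars.isIn (PySem.List.slice old.toList (some ((n : Int) - 1)) none) new.toList then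
    new                                                       -- no non-empty suffix of old occurs in new
  else
    let lo := bsearchB old.toList new.toList 0 ((n : Int) - 1)
    let i := PySem.Chars.find new.toList (PySem.List.slice old.toList (some lo) none)
    String.ofList (PySem.List.slice new.toList (some (i + ((n : Int) - lo))) none)  -- new[new.find(old[lo:]) + (n-lo):]

-- ===== PRECONDITION & SPEC =====
def Spec_find_new_stuff (old : String) (new : String) (out : String) : Prop := out = find_new_stuff_alt old new
instance (old : String) (new : String) (out : String) : Decidable (Spec_find_new_stuff old new out) := by unfold Spec_find_new_stuff; infer_instance

-- ===== CLAIM (what is proved, stated in full; the proofs are below) =====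
def Claim_equal_find_new_stuff : Prop := ∀ (old : String) (new : String), Dom_find_new_stuff old new → Spec_find_new_stuff old new (find_new_stuff old new)

-- ===== LEMMAS AND PROOFS =====

-- occurrence of old[k:] in new is monotone in k
lemma drop_infix_mono (oldL newL : List Char) {k k' : Nat} (hkk : k ≤ k')
    (h : oldL.drop k <:+: newL) : oldL.drop k' <:+: newL := by
  have he : oldL.drop k' = (oldL.drop k).drop (k' - k) := by
    rw [List.drop_drop]; congr 1; omega
  rw [he]
  exact ((List.drop_suffix (k' - k) (oldL.drop k)).isInfix).trans h

-- A's loop, when k is the least drop with old[k:] occurring in new, stops exactly there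
lemma findLoopA_of_min (newL : List Char) : ∀ (oldL : List Char) (k : Nat),
    k < oldL.length → oldL.drop k <:+: newL → (∀ j < k, ¬ oldL.drop j <:+: newL) →
    findLoopA oldL newL = (PySem.Chars.find newL (oldL.drop k), oldL.drop k) := by
  intro oldL
  induction oldL with
  | nil => intro k hk; simp at hk
  | cons c t ih =>
    intro k hk hinf hmin
    rw [findLoopA]
    cases k with
    | zero =>
      have : 0 ≤ PySem.Chars.find newL (c :: t) := (PySem.Chars.find_nonneg_iff _ _).mpr (by simpa using hinf)
      simp [this]
    | succ j =>
      have h0 : ¬ (c :: t) <:+: newL := by simpa using hmin 0 (Nat.succ_pos j)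
      have hf : PySem.Chars.find newL (c :: t) = -1 := (PySem.Chars.find_eq_neg_one_iff _ _).mpr h0
      have ht : PySem.List.slice (c :: t) (some 1) none = t := by
        rw [PySem.List.slice_from_one]; rfl
      have htne : t ≠ [] := by
        intro h; subst h; simp at hk
      simp only [hf, ht]
      rw [if_neg (by norm_num), if_neg (by simpa using htne)]
      have := ih j (by simpa using hk) (by simpa using hinf)
        (fun j' hj' => by simpa using hmin (j' + 1) (by omega))
      simpa using this

-- when no non-empty suffix of old occurs in new, A's loop ends with found_idx = -1
lemma findLoopA_of_none (newL : List Char) : ∀ (oldL : List Char), oldL ≠ [] →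
    (∀ j < oldL.length, ¬ oldL.drop j <:+: newL) →
    (findLoopA oldL newL).1 = -1 := by
  intro oldL
  induction oldL with
  | nil => intro h; simp at h
  | cons c t ih =>
    intro _ hnone
    rw [findLoopA]
    have h0 : ¬ (c :: t) <:+: newL := by simpa using hnone 0 (Nat.succ_pos t.length)
    have hf : PySem.Chars.find newL (c :: t) = -1 := (PySem.Chars.find_eq_neg_one_iff _ _).mpr h0
    have ht : PySem.List.slice (c :: t) (some 1) none = t := by
      rw [PySem.List.slice_from_one]; rfl
    simp only [hf, ht]
    rw [if_neg (by norm_num)]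
    by_cases htn : t = []
    · subst htn; simp
    · rw [if_neg (by simpa using htn)]
      exact ih htn (fun j hj => by simpa using hnone (j + 1) (by simpa using hj))

-- B's binary search returns the least k with old[k:] occurring in new
lemma bsearchB_eq (oldL newL : List Char) (k : Nat)
    (hQ : oldL.drop k <:+: newL) (hmin : ∀ j < k, ¬ oldL.drop j <:+: newL) :
    ∀ (lo hi : Int), 0 ≤ lo → lo ≤ hi →
    oldL.drop hi.toNat <:+: newL → (∀ j : Nat, (j : Int) < lo → ¬ oldL.drop j <:+: newL) →
    bsearchB oldL newL lo hi = (k : Int) := by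
  intro lo hi
  induction hn : (hi - lo).toNat using Nat.strong_induction_on generalizing lo hi with
  | _ n ih =>
    intro hlo hlohi hQhi hlomin
    have hklo : lo ≤ (k : Int) := by
      by_contra h
      exact hlomin k (by omega) hQ
    have hkhi : k ≤ hi.toNat := by
      by_contra h
      exact hmin hi.toNat (by omega) hQhi
    rw [bsearchB]
    by_cases h : lo < hi
    · rw [dif_pos h]
      have hb := PySem.Int.floordiv_two_mid_bounds (le_of_lt h)
      set mid := PySem.Int.floordiv (lo + hi) 2 with hmid
      have hmidlt : mid < hi := by
        rw [hmid, PySem.Int.floordiv_lt_iff_lt_mul (by norm_num)]; omega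
      have hsl : PySem.List.slice oldL (some mid) none = oldL.drop mid.toNat :=
        PySem.List.slice_from oldL (by omega)
      by_cases hin : oldL.drop mid.toNat <:+: newL
      · rw [if_pos (by rw [hsl]; exact (PySem.Chars.isIn_iff_infix _ _).mpr hin)]
        exact ih (mid - lo).toNat (by omega) lo mid (by omega) hlo (by omega) hin hlomin
      · rw [if_neg (by rw [hsl]; simpa using ((PySem.Chars.isIn_eq_false_iff _ _).mpr hin))]
        refine ih (hi - (mid + 1)).toNat (by omega) (mid + 1) hi (by omega) (by omega) (by omega) hQhi ?_
        intro j hj hcon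
        exact hin (drop_infix_mono oldL newL (by omega) hcon)
    · rw [dif_neg h]
      have : lo = hi := by omega
      subst this
      -- lo ≤ k and ¬ (lo.toNat < k) (else hmin would refute hQhi), so lo = k
      have : ¬ lo.toNat < k := fun hlt => hmin lo.toNat hlt hQhi
      omega

-- ===== VERDICT (by name: the statement is the Claim_ definition above) =====
theorem find_new_stuff_spec : Claim_equal_find_new_stuff := by
  intro old new _
  unfold Spec_find_new_stuff find_new_stuff find_new_stuff_alt
  set oldL := old.toList with holdL
  set newL := new.toList with hnewL
  set n := oldL.length with hn
  by_cases hz : n = 0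
  · -- old = "": A's find("") = 0, returns new[0:] = new; B returns new
    have hnil : oldL = [] := List.length_eq_zero_iff.mp hz
    simp only [hnil, hz]
    rw [findLoopA]
    simp [PySem.Chars.find_nil, PySem.List.slice_none_none, String.ofList_toList, hnewL]
  · have hnpos : 0 < n := Nat.pos_of_ne_zero hz
    have hsl1 : PySem.List.slice oldL (some ((n : Int) - 1)) none = oldL.drop (n - 1) := by
      have : ((n : Int) - 1) = ((n - 1 : Nat) : Int) := by omega
      rw [this, PySem.List.slice_from_natCast]
    by_cases hP : oldL.drop (n - 1) <:+: newL
    · -- some non-empty suffix of old occurs in new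
      have hex : ∃ k, oldL.drop k <:+: newL := ⟨n - 1, hP⟩
      classical
      let k := Nat.find hex
      have hQk : oldL.drop k <:+: newL := Nat.find_spec hex
      have hmin : ∀ j < k, ¬ oldL.drop j <:+: newL := fun j hj => Nat.find_min hex hj
      have hkle : k ≤ n - 1 := Nat.find_min' hex hP
      have hklt : k < n := by omega
      have hA := findLoopA_of_min newL oldL k hklt hQk hmin
      have hB := bsearchB_eq oldL newL k hQk hmin 0 ((n : Int) - 1) (by omega) (by omega)
        (by rw [show (((n : Int) - 1)).toNat = n - 1 by omega]; exact hP)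
        (fun j hj => by omega)
      have hfpos : 0 ≤ PySem.Chars.find newL (oldL.drop k) := (PySem.Chars.find_nonneg_iff _ _).mpr hQk
      have hIn : PySem.Chars.isIn (PySem.List.slice oldL (some ((n : Int) - 1)) none) newL = true := by
        rw [hsl1]; exact (PySem.Chars.isIn_iff_infix _ _).mpr hP
      have hslk : PySem.List.slice oldL (some ((k : Nat) : Int)) none = oldL.drop k :=
        PySem.List.slice_from_natCast oldL k
      rw [hA]
      simp [hz, hIn, hB, hslk, not_lt.mpr hfpos]
      rw [show ((oldL.length - k : Nat) : Int) = (n : Int) - (k : Int) by omega]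
    · -- not even the last character of old occurs in new: both return new
      have hnone : ∀ j < n, ¬ oldL.drop j <:+: newL := by
        intro j hj hcon
        exact hP (drop_infix_mono oldL newL (by omega) hcon)
      have hnil : oldL ≠ [] := by
        intro h; rw [h] at hn; simp at hn; omega
      have hA := findLoopA_of_none newL oldL hnil hnone
      rw [if_pos (Or.inr (by rw [hsl1]; simpa using (PySem.Chars.isIn_eq_false_iff _ _).mpr hP))]
      rw [if_pos (by omega)]
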